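-- pv_equiv track=rewrite | github.com/niknibud-student/ege | files/ege_08_funcs.py | convert
-- ===== SOURCE A (Python) =====
-- def convert(place: int, letters: str, len_word: int) -> str:
--     '''Функция определяет слово, стоящеее на определеном месте'''
--     sys = len(letters)  # Определяем систему счисления
--     num = place - 1
--     n_sys = []
--     while num > 0:
--         n_sys.insert(0, num % sys)
--         num //= sys
--     n_sys = [0] * (len_word - len(n_sys)) + n_sys
--     return ''.join([letters[x] for x in n_sys])
-- ===== SOURCE B (Python) =====
-- def convert(place: int, letters: str, len_word: int) -> str:
--     '''MSB-first re-implementation: count the base-len(letters) digits of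
--     place-1, left-pad with the zero letter, then emit the digits
--     most-significant first, dividing a running power down.'''
--     sys = len(letters)
--     num = max(place - 1, 0)
--     needed = 0
--     t = num
--     while t > 0:
--         needed += 1
--         t //= sys
--     pad = max(len_word - needed, 0)
--     out = [letters[0:1] * pad]
--     p = sys ** (needed - 1) if needed > 0 else 1
--     for _ in range(needed):
--         out.append(letters[num // p])
--         num %= p
--         p //= sys
--     return ''.join(out)
-- ===== Notes on version B (the rewrite author's own statement) =====
-- stated objective: faster
-- what changed: Replaces A's LSB-first remainder loop with insert(0) plus a per-position [0]*pad list and per-character indexing by a digit-count pass, one string-repetition pad letters[0:1]*pad, and an MSB-first digit pass that divides a running power down.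
import Mathlib
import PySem

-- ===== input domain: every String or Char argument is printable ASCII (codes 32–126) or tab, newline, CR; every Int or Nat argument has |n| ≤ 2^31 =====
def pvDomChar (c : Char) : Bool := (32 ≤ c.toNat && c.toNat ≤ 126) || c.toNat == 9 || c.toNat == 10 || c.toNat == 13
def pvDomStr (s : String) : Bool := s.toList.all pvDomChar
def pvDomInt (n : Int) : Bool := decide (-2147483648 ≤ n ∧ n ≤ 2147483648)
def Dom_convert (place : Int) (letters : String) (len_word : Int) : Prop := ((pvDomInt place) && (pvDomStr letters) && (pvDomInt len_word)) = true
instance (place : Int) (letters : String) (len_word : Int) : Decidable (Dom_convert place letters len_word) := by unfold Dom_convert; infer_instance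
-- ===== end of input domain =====

-- B replaces A's LSB-first remainder/insert(0)/left-pad construction by a digit-count pass
-- plus a single MSB-first pass dividing a running power down (objective: alternative).

-- ===== PORT A =====
-- the while-loop of A; fuel = (place-1).toNat suffices because A's loop, where it
-- terminates (sys ≥ 2), strictly decreases num each iteration; n_sys.insert(0, d) prepends
def convertLoopA : Nat → Int → Int → List Int → List Int
  | 0, _, _, acc => acc
  | f+1, num, sys, acc =>
    if num > 0 then
      convertLoopA f (PySem.Int.floordiv num sys) sys (PySem.Int.mod num sys :: acc)
    else acc

-- ''.join of the one-character strings letters[x] = the string of those characters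
def convert (place : Int) (letters : String) (len_word : Int) : String :=
  let sys := PySem.Str.len letters
  let num := place - 1
  let n_sys := convertLoopA num.toNat num sys []
  let n_sys2 := List.replicate (len_word - (n_sys.length : Int)).toNat (0 : Int) ++ n_sys
  String.mk (n_sys2.map (fun x => (PySem.Str.pyGet? letters x).getD ' '))

-- ===== PORT B =====
-- the digit-count while-loop of B; fuel = num.toNat suffices (num strictly decreases when sys ≥ 2)
def ndigitsLoop : Nat → Int → Int → Int
  | 0, _, _ => 0
  | f+1, t, sys => if t > 0 then 1 + ndigitsLoop f (PySem.Int.floordiv t sys) sys else 0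

-- B's for-loop: emit letters[num // p], then num %= p; p //= sys
def convertLoopB : Nat → Int → Int → Int → String → List Char
  | 0, _, _, _, _ => []
  | n+1, num, p, sys, letters =>
    (PySem.Str.pyGet? letters (PySem.Int.floordiv num p)).getD ' ' ::
      convertLoopB n (PySem.Int.mod num p) (PySem.Int.floordiv p sys) sys letters

def convert_alt (place : Int) (letters : String) (len_word : Int) : String :=
  let sys := PySem.Str.len letters
  let num := max (place - 1) 0
  let needed := ndigitsLoop num.toNat num sys
  let pad := max (len_word - needed) 0
  let p := if needed > 0 then sys ^ (needed - 1).toNat else 1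
  -- out = [letters[0:1] * pad] then the appended letters[num // p]; ''.join = concatenation
  String.mk ((List.replicate pad.toNat (PySem.Str.slice letters (some 0) (some 1)).toList).flatten
    ++ convertLoopB needed.toNat num p sys letters)

-- ===== PRECONDITION & SPEC =====
-- Pre_ excludes exactly the inputs on which A does not return: with an empty alphabet A
-- raises (ZeroDivisionError if place > 1, IndexError if len_word > 0), and with a
-- one-letter alphabet and place > 1 A's while-loop never terminates.
def Pre_convert (place : Int) (letters : String) (len_word : Int) : Prop :=
  2 ≤ PySem.Str.len letters ∨ (place ≤ 1 ∧ (PySem.Str.len letters = 1 ∨ len_word ≤ 0))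
instance (place : Int) (letters : String) (len_word : Int) : Decidable (Pre_convert place letters len_word) := by unfold Pre_convert; infer_instance

def pvWitness_convert : Int × String × Int := (5, "ab", 3)

def Spec_convert (place : Int) (letters : String) (len_word : Int) (out : String) : Prop := out = convert_alt place letters len_word
instance (place : Int) (letters : String) (len_word : Int) (out : String) : Decidable (Spec_convert place letters len_word out) := by unfold Spec_convert; infer_instance

-- ===== CLAIM (what is proved, stated in full; the proofs are below) =====
def Claim_equal_convert : Prop := ∀ (place : Int) (letters : String) (len_word : Int), Dom_convert place letters len_word → Pre_convert place letters len_word → Spec_convert place letters len_word (convert place letters len_word)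

-- ===== LEMMAS AND PROOFS =====

-- proof-side specification: the MSB-first digit list of num with L digits in base sys
def digitsMSB (sys : Int) : Nat → Int → List Int
  | 0, _ => []
  | e+1, num => PySem.Int.floordiv num (sys ^ e) :: digitsMSB sys e (PySem.Int.mod num (sys ^ e))

theorem digitsMSB_zero (sys : Int) (hs : 1 ≤ sys) :
    ∀ e : Nat, digitsMSB sys e 0 = List.replicate e 0 := by
  intro e
  induction e with
  | zero => rfl
  | succ e ih =>
    have hp : (0:Int) < sys ^ e := pow_pos (by omega) e
    simp [digitsMSB, List.replicate_succ, ih,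
      PySem.Int.floordiv_eq_ediv_of_pos hp, PySem.Int.mod_eq_emod_of_pos hp]

theorem loopB_eq_digits (letters : String) (sys : Int) (hs : 1 ≤ sys) :
    ∀ (e : Nat) (num : Int),
      convertLoopB (e+1) num (sys ^ e) sys letters =
        (digitsMSB sys (e+1) num).map (fun x => (PySem.Str.pyGet? letters x).getD ' ') := by
  intro e
  induction e with
  | zero => intro num; rfl
  | succ e ih =>
    intro num
    have hdiv : PySem.Int.floordiv (sys ^ (e+1)) sys = sys ^ e := by
      rw [PySem.Int.floordiv_eq_ediv_of_pos (by omega : (0:Int) < sys), pow_succ]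
      exact Int.mul_ediv_cancel _ (by omega)
    have hunf : convertLoopB (e+1+1) num (sys ^ (e+1)) sys letters =
        (PySem.Str.pyGet? letters (PySem.Int.floordiv num (sys ^ (e+1)))).getD ' ' ::
          convertLoopB (e+1) (PySem.Int.mod num (sys ^ (e+1)))
            (PySem.Int.floordiv (sys ^ (e+1)) sys) sys letters := rfl
    rw [hunf, hdiv, ih]
    simp [digitsMSB]

theorem loopA_acc (sys : Int) :
    ∀ (f : Nat) (num : Int) (acc : List Int),
      convertLoopA f num sys acc = convertLoopA f num sys [] ++ acc := by
  intro f
  induction f with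
  | zero => intro num acc; rfl
  | succ f ih =>
    intro num acc
    by_cases h : num > 0
    · simp only [convertLoopA, if_pos h]
      rw [ih _ (PySem.Int.mod num sys :: acc), ih _ [PySem.Int.mod num sys],
        List.append_assoc]
      rfl
    · simp [convertLoopA, h]

theorem ndigits_eq_length (sys : Int) :
    ∀ (f : Nat) (num : Int),
      ndigitsLoop f num sys = ((convertLoopA f num sys []).length : Int) := by
  intro f
  induction f with
  | zero => intro num; rfl
  | succ f ih =>
    intro num
    by_cases h : num > 0
    · simp only [ndigitsLoop, convertLoopA, if_pos h]
      rw [loopA_acc, List.length_append, ih]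
      simp only [List.length_singleton]
      push_cast; ring
    · simp [ndigitsLoop, convertLoopA, h]

theorem loopA_bound (sys : Int) (hs : 2 ≤ sys) :
    ∀ (f : Nat) (num : Int), 0 ≤ num → num.toNat ≤ f →
      num < sys ^ (convertLoopA f num sys []).length := by
  intro f
  induction f with
  | zero =>
    intro num h0 hf
    simp only [convertLoopA, List.length_nil, pow_zero]
    omega
  | succ f ih =>
    intro num h0 hf
    by_cases h : num > 0
    · simp only [convertLoopA, if_pos h]
      rw [loopA_acc, List.length_append]
      set q := PySem.Int.floordiv num sys with hq
      have hqe : q = num / sys := PySem.Int.floordiv_eq_ediv_of_pos (by omega)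
      have hq0 : 0 ≤ q := by rw [hqe]; exact Int.ediv_nonneg h0 (by omega)
      have hdm : sys * (num / sys) + num % sys = num := Int.ediv_add_emod num sys
      have hm0 : 0 ≤ num % sys := Int.emod_nonneg num (by omega)
      have hmlt : num % sys < sys := Int.emod_lt_of_pos num (by omega)
      have hstep : num < sys * (q + 1) := by
        have hx : sys * (q + 1) = sys * (num / sys) + sys := by rw [hqe]; ring
        omega
      have hqlt : q < num := by
        have : 0 ≤ sys * q := mul_nonneg (by omega) hq0
        have hx : sys * q = sys * (num / sys) := by rw [hqe]
        nlinarith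
      have ihq := ih q hq0 (by omega)
      have hrec : num < sys * sys ^ (convertLoopA f q sys []).length :=
        lt_of_lt_of_le hstep
          (mul_le_mul_of_nonneg_left (by omega) (by omega : (0:Int) ≤ sys))
      simpa [pow_succ, mul_comm] using hrec
    · simp only [convertLoopA, if_neg h, List.length_nil, pow_zero]; omega

theorem digitsMSB_peel (sys : Int) (hs : 0 < sys) :
    ∀ (L : Nat) (num : Int), 0 ≤ num → num < sys ^ (L+1) →
      digitsMSB sys (L+1) num =
        digitsMSB sys L (PySem.Int.floordiv num sys) ++ [PySem.Int.mod num sys] := by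
  intro L
  induction L with
  | zero =>
    intro num h0 hlt
    have hlt1 : num < sys := by simpa using hlt
    show [PySem.Int.floordiv num (sys ^ 0)] = [PySem.Int.mod num sys]
    rw [pow_zero, PySem.Int.floordiv_eq_ediv_of_pos (by omega : (0:Int) < 1), Int.ediv_one,
      PySem.Int.mod_eq_emod_of_pos hs, Int.emod_eq_of_lt h0 hlt1]
  | succ L ih =>
    intro num h0 hlt
    have hpL : (0:Int) < sys ^ L := pow_pos hs L
    have hpL1 : (0:Int) < sys ^ (L+1) := pow_pos hs (L+1)
    have hq : PySem.Int.floordiv num sys = num / sys :=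
      PySem.Int.floordiv_eq_ediv_of_pos hs
    have hm1 : PySem.Int.mod num (sys ^ (L+1)) = num % sys ^ (L+1) :=
      PySem.Int.mod_eq_emod_of_pos hpL1
    -- heads agree: num // sys^(L+1) = (num // sys) // sys^L
    have hhead : PySem.Int.floordiv num (sys ^ (L+1)) =
        PySem.Int.floordiv (PySem.Int.floordiv num sys) (sys ^ L) := by
      rw [PySem.Int.floordiv_eq_ediv_of_pos hpL1, hq,
        PySem.Int.floordiv_eq_ediv_of_pos hpL,
        Int.ediv_ediv_of_nonneg (by omega : (0:Int) ≤ sys), ← pow_succ']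
    set m := num % sys ^ (L+1) with hm
    have hm0 : 0 ≤ m := Int.emod_nonneg num (by omega)
    have hmlt : m < sys ^ (L+1) := Int.emod_lt_of_pos num hpL1
    have ihm := ih m hm0 hmlt
    -- last digits agree: m % sys = num % sys
    have hlast : PySem.Int.mod m sys = PySem.Int.mod num sys := by
      rw [PySem.Int.mod_eq_emod_of_pos hs, PySem.Int.mod_eq_emod_of_pos hs, hm]
      exact Int.emod_emod_of_dvd num (dvd_pow_self sys (Nat.succ_ne_zero L))
    -- middle digits agree: m // sys = (num // sys) % sys^L
    have hmid : PySem.Int.floordiv m sys = PySem.Int.mod (PySem.Int.floordiv num sys) (sys ^ L) := by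
      rw [PySem.Int.floordiv_eq_ediv_of_pos hs, hq, PySem.Int.mod_eq_emod_of_pos hpL, hm]
      -- (num % (sys * sys^L)) / sys = (num / sys) % sys^L
      have hr0 : 0 ≤ num % sys := Int.emod_nonneg num (by omega)
      have hrlt : num % sys < sys := Int.emod_lt_of_pos num hs
      -- num % sys^(L+1) = sys * ((num/sys) % sys^L) + num % sys
      have hdecomp : num % sys ^ (L+1) = sys * ((num / sys) % sys ^ L) + num % sys := by
        have e1 : sys ^ (L+1) * (num / sys ^ (L+1)) + num % sys ^ (L+1) = num :=
          Int.ediv_add_emod num (sys ^ (L+1))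
        have e2 : sys * (num / sys) + num % sys = num := Int.ediv_add_emod num sys
        have e3 : sys ^ L * (num / sys / sys ^ L) + (num / sys) % sys ^ L = num / sys :=
          Int.ediv_add_emod (num / sys) (sys ^ L)
        have e4 : num / sys / sys ^ L = num / sys ^ (L+1) := by
          rw [Int.ediv_ediv_of_nonneg (by omega : (0:Int) ≤ sys), ← pow_succ']
        have e5 : sys ^ (L+1) = sys * sys ^ L := by rw [pow_succ']
        linear_combination e1 - e2 - sys * e3 + sys ^ (L+1) * e4 - (num / sys / sys ^ L) * e5
      rw [hdecomp, add_comm, Int.add_mul_ediv_left _ _ (by omega : sys ≠ 0),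
        Int.ediv_eq_zero_of_lt hr0 hrlt, zero_add]
    calc digitsMSB sys (L+1+1) num
        = PySem.Int.floordiv num (sys ^ (L+1)) :: digitsMSB sys (L+1) m := by
          simp [digitsMSB, hm1, hm]
      _ = PySem.Int.floordiv (PySem.Int.floordiv num sys) (sys ^ L) ::
            (digitsMSB sys L (PySem.Int.floordiv m sys) ++ [PySem.Int.mod m sys]) := by
          rw [hhead, ihm]
      _ = digitsMSB sys (L+1) (PySem.Int.floordiv num sys) ++ [PySem.Int.mod num sys] := by
          rw [hmid, hlast]; simp [digitsMSB]

theorem digitsMSB_of_loopA (sys : Int) (hs : 2 ≤ sys) :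
    ∀ (f : Nat) (num : Int) (L : Nat), 0 ≤ num → num.toNat ≤ f →
      num < sys ^ L → (convertLoopA f num sys []).length ≤ L →
      digitsMSB sys L num =
        List.replicate (L - (convertLoopA f num sys []).length) 0 ++ convertLoopA f num sys [] := by
  intro f
  induction f with
  | zero =>
    intro num L h0 hf hL hlen
    have : num = 0 := by omega
    subst this
    simp [convertLoopA, digitsMSB_zero sys (by omega)]
  | succ f ih =>
    intro num L h0 hf hL hlen
    by_cases h : num > 0
    · have hLpos : 1 ≤ L := by
        by_contra hc
        have : L = 0 := by omega
        subst this
        simp at hL; omega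
      obtain ⟨L', rfl⟩ : ∃ L', L = L' + 1 := ⟨L - 1, by omega⟩
      have hunf : convertLoopA (f+1) num sys [] =
          convertLoopA f (PySem.Int.floordiv num sys) sys [] ++ [PySem.Int.mod num sys] := by
        simp only [convertLoopA, if_pos h]
        exact loopA_acc sys f _ _
      set q := PySem.Int.floordiv num sys with hqdef
      have hqe : q = num / sys := PySem.Int.floordiv_eq_ediv_of_pos (by omega)
      have hq0 : 0 ≤ q := by rw [hqe]; exact Int.ediv_nonneg h0 (by omega)
      have hqlt : q < num := by
        rw [hqe, Int.ediv_lt_iff_lt_mul (by omega : (0:Int) < sys)]; nlinarith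
      have hqL : q < sys ^ L' := by
        rw [hqe, Int.ediv_lt_iff_lt_mul (by omega : (0:Int) < sys), ← pow_succ]
        exact hL
      have hlen' : (convertLoopA f q sys []).length ≤ L' := by
        rw [hunf, List.length_append] at hlen; simpa using hlen
      have ihq := ih q L' hq0 (by omega) hqL hlen'
      rw [digitsMSB_peel sys (by omega) L' num h0 hL, ihq, hunf]
      rw [List.length_append]
      simp only [List.length_cons, List.length_nil]
      have : L' + 1 - ((convertLoopA f q sys []).length + (0 + 1)) =
          L' - (convertLoopA f q sys []).length := by omega
      rw [this, List.append_assoc]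
    · have : num = 0 := by omega
      subst this
      simp [convertLoopA, digitsMSB_zero sys (by omega)]

-- padding with letters[0:1] repeated = mapping the zero digit, for a nonempty alphabet
theorem flatten_replicate_singleton : ∀ (k : Nat) (c : Char),
    (List.replicate k [c]).flatten = List.replicate k c := by
  intro k c
  induction k with
  | zero => rfl
  | succ k ih => simp [List.replicate_succ, ih]

theorem pad_map_eq (letters : String) (h : 1 ≤ PySem.Str.len letters) (k : Nat) :
    (List.replicate k (PySem.Str.slice letters (some 0) (some 1)).toList).flatten
      = (List.replicate k (0:Int)).map (fun x => (PySem.Str.pyGet? letters x).getD ' ') := by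
  have hne : letters.toList ≠ [] := by
    intro hnil
    rw [PySem.Str.len_eq, hnil] at h
    simp at h
  obtain ⟨c, rest, hc⟩ : ∃ c rest, letters.toList = c :: rest := by
    cases hl : letters.toList with
    | nil => exact absurd hl hne
    | cons c rest => exact ⟨c, rest, rfl⟩
  have hslice : (PySem.Str.slice letters (some 0) (some 1)).toList = [c] := by
    simp [PySem.Str.slice, PySem.List.slice_to, hc]
  have hget : (PySem.Str.pyGet? letters (0:Int)).getD ' ' = c := by
    simp [PySem.Str.pyGet?, hc]
  rw [hslice, flatten_replicate_singleton, List.map_replicate, hget]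

-- the A-side list, padded, equals B's pad-then-MSB-digits construction
theorem convert_eq_alt (place : Int) (letters : String) (len_word : Int)
    (hpre : Pre_convert place letters len_word) :
    convert place letters len_word = convert_alt place letters len_word := by
  simp only [convert, convert_alt]
  set sys := PySem.Str.len letters with hsys
  have hsys0 : 0 ≤ sys := by
    rw [hsys, PySem.Str.len]; positivity
  set num0 : Int := place - 1 with hnum0
  by_cases hpos : 0 < num0
  · -- place > 1: Pre_ forces sys ≥ 2
    have hs2 : 2 ≤ sys := by
      rcases hpre with h | ⟨h, _⟩
      · exact h
      · omega
    have hmax : max num0 0 = num0 := by omega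
    rw [hmax]
    set D := convertLoopA num0.toNat num0 sys [] with hD
    have hnd : ndigitsLoop num0.toNat num0 sys = (D.length : Int) :=
      ndigits_eq_length sys _ _
    rw [hnd]
    have hbound : num0 < sys ^ D.length :=
      loopA_bound sys hs2 num0.toNat num0 (by omega) (le_refl _)
    have hD1 : 1 ≤ D.length := by
      by_contra hc
      have : D.length = 0 := by omega
      rw [this] at hbound; simp at hbound; omega
    have hneedpos : (0:Int) < (D.length : Int) := by exact_mod_cast hD1
    rw [if_pos hneedpos]
    have hNt : ((D.length : Int)).toNat = D.length := Int.toNat_natCast _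
    have hNt1 : (((D.length : Int)) - 1).toNat + 1 = D.length := by omega
    rw [hNt]
    have hcomb := digitsMSB_of_loopA sys hs2 num0.toNat num0 D.length (by omega)
      (le_refl _) hbound (le_refl _)
    rw [← hD] at hcomb
    simp only [Nat.sub_self, List.replicate_zero, List.nil_append] at hcomb
    have hloopB := loopB_eq_digits letters sys (by omega)
      (((D.length : Int)) - 1).toNat num0
    rw [hNt1] at hloopB
    rw [hloopB, hcomb, List.map_append]
    have hpadk : (max (len_word - (D.length : Int)) 0).toNat
        = (len_word - (D.length : Int)).toNat := by omega
    rw [hpadk, pad_map_eq letters (by omega)]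
  · -- place ≤ 1: A's loop body never runs, everything is zero-letter padding
    have hz : num0.toNat = 0 := by omega
    have hmax : max num0 0 = 0 := by omega
    rw [hz, hmax]
    simp only [Int.toNat_zero, convertLoopA, ndigitsLoop, List.length_nil, Nat.cast_zero,
      sub_zero, List.append_nil, gt_iff_lt, lt_irrefl, if_false, convertLoopB]
    by_cases hlw : 0 < len_word
    · have hs1 : 1 ≤ sys := by
        rcases hpre with h | ⟨_, h | h⟩ <;> omega
      have hk : (max len_word (0:Int)).toNat = len_word.toNat := by omega
      rw [hk, pad_map_eq letters hs1]
    · have hk : (max len_word (0:Int)).toNat = 0 := by omega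
      have hk' : len_word.toNat = 0 := by omega
      rw [hk, hk']
      rfl

-- ===== VERDICT (by name: the statement is the Claim_ definition above) =====
theorem convert_spec : Claim_equal_convert := by
  intro place letters len_word _ hpre
  unfold Spec_convert
  exact convert_eq_alt place letters len_word hpre
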